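-- pv_equiv track=rewrite | github.com/kth4778/Algorithm | 백준/Gold/17140. 이차원 배열과 연산/이차원 배열과 연산.py | chage_arr
-- ===== SOURCE A (Python) =====
-- from collections import Counter
--
-- def chage_arr(lst):
--     c = [[num, cnt] for num, cnt in Counter(lst).items() if num != 0]
--     c.sort(key = lambda x : (x[1],x[0]))
--
--     result = []
--
--     for i in c:
--         for j in i:
--             result.append(j)
--     return result, len(result)
-- ===== SOURCE B (Python) =====
-- def chage_arr(lst):
--     # sort-and-group counting instead of a hash Counter
--     vals = sorted(x for x in lst if x != 0)
--     pairs = []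
--     for v in vals:
--         if pairs and pairs[-1][0] == v:
--             pairs[-1][1] += 1
--         else:
--             pairs.append([v, 1])
--     pairs.sort(key=lambda p: (p[1], p[0]))
--     result = []
--     for p in pairs:
--         result.extend(p)
--     return result, len(result)
-- ===== Notes on version B (the rewrite author's own statement) =====
-- stated objective: alternative
-- what changed: Replaces the hash-based Counter with sort-then-group run-length counting: nonzero values are sorted, adjacent runs are counted in one scan, and the (value,count) pairs are then sorted by (count,value) and flattened.
import Mathlib
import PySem

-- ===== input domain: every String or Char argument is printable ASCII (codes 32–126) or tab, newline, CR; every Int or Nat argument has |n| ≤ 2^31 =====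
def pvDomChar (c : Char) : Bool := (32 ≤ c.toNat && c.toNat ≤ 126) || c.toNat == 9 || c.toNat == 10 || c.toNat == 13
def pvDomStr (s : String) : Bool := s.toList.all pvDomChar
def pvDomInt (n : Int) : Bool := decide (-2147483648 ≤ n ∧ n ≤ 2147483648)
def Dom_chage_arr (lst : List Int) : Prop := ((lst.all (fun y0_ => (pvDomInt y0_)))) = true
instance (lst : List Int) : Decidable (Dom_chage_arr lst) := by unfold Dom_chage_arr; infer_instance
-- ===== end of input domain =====

-- B replaces A's hash-based Counter with sort-then-group run-length counting (alternative decomposition, same result).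


-- ===== PORT A =====
-- c = [[num, cnt] for num, cnt in Counter(lst).items() if num != 0]; c.sort(key=(cnt,num)); flatten
def chage_arr (lst : List Int) : List Int × Int :=
  let c := ((PySem.Dict.counter lst).items.filter (fun p => decide (p.1 ≠ 0)))
  let c := PySem.List.sorted2 c (fun x => x.2) (fun x => x.1)
  let result := c.foldl (fun res i => [i.1, i.2].foldl (fun res j => res ++ [j]) res) []
  (result, (result.length : Int))

-- ===== PORT B =====
-- one step of Source B's run-length loop; the `pairs` accumulator is kept reversed (append-at-end = cons)
def pvStep (acc : List (Int × Int)) (v : Int) : List (Int × Int) :=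
  match acc with
  | (v0, c0) :: t => if v0 = v then (v0, c0 + 1) :: t else (v, 1) :: (v0, c0) :: t
  | [] => [(v, 1)]

def chage_arr_alt (lst : List Int) : List Int × Int :=
  let vals := PySem.List.sorted (lst.filter (fun x => decide (x ≠ 0))) (fun x => x)
  let pairs := (vals.foldl pvStep []).reverse
  let pairs := PySem.List.sorted2 pairs (fun p => p.2) (fun p => p.1)
  let result := pairs.foldl (fun res p => res ++ [p.1, p.2]) []
  (result, (result.length : Int))

-- ===== PRECONDITION & SPEC =====
def Spec_chage_arr (lst : List Int) (out : List Int × Int) : Prop := out = chage_arr_alt lst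
instance (lst : List Int) (out : List Int × Int) : Decidable (Spec_chage_arr lst out) := by unfold Spec_chage_arr; infer_instance

-- ===== CLAIM (what is proved, stated in full; the proofs are below) =====
def Claim_equal_chage_arr : Prop := ∀ (lst : List Int), Dom_chage_arr lst → Spec_chage_arr lst (chage_arr lst)

-- ===== LEMMAS AND PROOFS =====

-- ordered run-length encoding starting from a run (v0, c0)
def pvRleFrom (v0 c0 : Int) : List Int → List (Int × Int)
  | [] => [(v0, c0)]
  | x :: l => if x = v0 then pvRleFrom v0 (c0 + 1) l else (v0, c0) :: pvRleFrom x 1 l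

theorem pvStep_foldl (l : List Int) : ∀ (v0 c0 : Int) (t : List (Int × Int)),
    l.foldl pvStep ((v0, c0) :: t) = (pvRleFrom v0 c0 l).reverse ++ t := by
  induction l with
  | nil => intro v0 c0 t; simp [pvRleFrom]
  | cons x l ih =>
    intro v0 c0 t
    by_cases h : x = v0
    · simp [pvStep, pvRleFrom, h, ih]
    · have h' : ¬ v0 = x := fun e => h e.symm
      simp [pvStep, pvRleFrom, h, h', ih]

theorem pvRleFrom_mem_fst (l : List Int) : ∀ (v0 c0 k : Int),
    (k ∈ (pvRleFrom v0 c0 l).map Prod.fst ↔ k = v0 ∨ k ∈ l) := by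
  induction l with
  | nil => intro v0 c0 k; simp [pvRleFrom]
  | cons x l ih =>
    intro v0 c0 k
    by_cases h : x = v0
    · simp [pvRleFrom, h, ih]
    · simp [pvRleFrom, h, ih]

theorem pvRleFrom_ne_cons (l : List Int) (x v0 c0 : Int) (h : ¬ x = v0) :
    pvRleFrom v0 c0 (x :: l) = (v0, c0) :: pvRleFrom x 1 l := by
  simp [pvRleFrom, h]

theorem pvRleFrom_sorted (l : List Int) : ∀ (v0 c0 : Int),
    l.Pairwise (· ≤ ·) → (∀ y ∈ l, v0 ≤ y) →
    ((pvRleFrom v0 c0 l).map Prod.fst).Pairwise (· < ·) := by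
  induction l with
  | nil => intro v0 c0 _ _; simp [pvRleFrom]
  | cons x l ih =>
    intro v0 c0 hpw hge
    have hpw' : l.Pairwise (· ≤ ·) := hpw.tail
    have hxl : ∀ y ∈ l, x ≤ y := fun y hy => List.rel_of_pairwise_cons hpw hy
    by_cases h : x = v0
    · simpa [pvRleFrom, h] using ih v0 (c0 + 1) hpw' (h ▸ hxl)
    · have hv0x : v0 < x := lt_of_le_of_ne (hge x (by simp)) fun e => h e.symm
      have htail := ih x 1 hpw' hxl
      rw [pvRleFrom_ne_cons l x v0 c0 h, List.map_cons, List.pairwise_cons]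
      refine ⟨fun k hk => ?_, htail⟩
      rcases List.mem_map.mp hk with ⟨p, hp, rfl⟩
      have := (pvRleFrom_mem_fst l x 1 p.1).mp (List.mem_map.mpr ⟨p, hp, rfl⟩)
      rcases this with rfl | hmem
      · exact hv0x
      · exact lt_of_lt_of_le hv0x (hxl _ hmem)

theorem pvRleFrom_count (l : List Int) : ∀ (v0 c0 : Int),
    l.Pairwise (· ≤ ·) → (∀ y ∈ l, v0 ≤ y) →
    ∀ p ∈ pvRleFrom v0 c0 l, p.2 = (if p.1 = v0 then c0 + l.count v0 else (l.count p.1 : Int)) := by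
  induction l with
  | nil => intro v0 c0 _ _ p hp; simp [pvRleFrom] at hp; simp [hp]
  | cons x l ih =>
    intro v0 c0 hpw hge p hp
    have hpw' : l.Pairwise (· ≤ ·) := hpw.tail
    have hxl : ∀ y ∈ l, x ≤ y := fun y hy => List.rel_of_pairwise_cons hpw hy
    by_cases h : x = v0
    · subst h
      simp only [pvRleFrom, if_pos] at hp
      have := ih x (c0 + 1) hpw' hxl p hp
      by_cases hpx : p.1 = x
      · simp [hpx] at this ⊢; omega
      · have hxp : ¬ x = p.1 := fun e => hpx e.symm
        simp [hpx, hxp] at this ⊢; exact this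
    · have hv0x : v0 < x := lt_of_le_of_ne (hge x (by simp)) fun e => h e.symm
      have hv0notin : v0 ∉ x :: l := by
        simp only [List.mem_cons, not_or]
        exact ⟨by omega, fun hmem => by have := hxl _ hmem; omega⟩
      rw [pvRleFrom_ne_cons l x v0 c0 h] at hp
      rcases List.mem_cons.mp hp with rfl | hp
      · simp [List.count_eq_zero_of_not_mem hv0notin]
      · have hfst := (pvRleFrom_mem_fst l x 1 p.1).mp (List.mem_map.mpr ⟨p, hp, rfl⟩)
        have hp1ne : ¬ p.1 = v0 := by
          rcases hfst with rfl | hmem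
          · omega
          · have := hxl _ hmem; omega
        have := ih x 1 hpw' hxl p hp
        by_cases hpx : p.1 = x
        · simp [hpx, List.count_cons] at this ⊢; omega
        · have hxp : ¬ x = p.1 := fun e => hpx e.symm
          simp [hpx, hxp, hp1ne] at this ⊢; exact this

-- sorted2 with Int keys is sorted with the lexicographic pair key
theorem pvSorted2_eq_sorted_lex (xs : List (Int × Int)) :
    PySem.List.sorted2 xs (fun p => p.2) (fun p => p.1) =
    PySem.List.sorted xs (fun p => toLex (p.2, p.1)) := by
  show xs.foldl (fun acc x => PySem.List.insertBy _ x acc) [] =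
       xs.foldl (fun acc x => PySem.List.insertBy _ x acc) []
  have hbe : (fun a b : Int × Int =>
        decide (a.2 < b.2) || (!decide (b.2 < a.2) && decide (a.1 < b.1))) =
      (fun a b : Int × Int => decide (toLex (a.2, a.1) < toLex (b.2, b.1))) := by
    funext a b
    rw [Bool.eq_iff_iff]
    simp only [Prod.Lex.lt_iff, Bool.or_eq_true, Bool.and_eq_true, Bool.not_eq_eq_eq_not,
      decide_eq_true_eq, ofLex_toLex]
    constructor
    · rintro (h | ⟨h1, h2⟩)
      · exact Or.inl h
      · rcases lt_trichotomy a.2 b.2 with h3 | h3 | h3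
        · exact Or.inl h3
        · exact Or.inr ⟨h3, h2⟩
        · exact absurd h3 (by simpa using h1)
    · rintro (h | ⟨h1, h2⟩)
      · exact Or.inl h
      · exact Or.inr ⟨by simp [h1], h2⟩
  rw [hbe]

-- B's pre-sort pair list: closed form via pvRleFrom
theorem pvPairsB_eq (s : List Int) :
    (s.foldl pvStep []).reverse =
      (match s with | [] => [] | v :: t => pvRleFrom v 1 t) := by
  cases s with
  | nil => simp
  | cons v t =>
    show (t.foldl pvStep ((v, 1) :: [])).reverse = pvRleFrom v 1 t
    rw [pvStep_foldl t v 1 []]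
    simp

-- the three facts about B's run-length pair list on a sorted input
theorem pvB_props (s : List Int) (hspw : s.Pairwise (· ≤ ·)) :
    (∀ k, k ∈ ((s.foldl pvStep []).reverse.map Prod.fst) ↔ k ∈ s) ∧
    ((s.foldl pvStep []).reverse.map Prod.fst).Pairwise (· < ·) ∧
    (∀ p ∈ (s.foldl pvStep []).reverse, p.2 = (s.count p.1 : Int)) := by
  rw [pvPairsB_eq]
  cases s with
  | nil => simp
  | cons v t =>
    have hpw : t.Pairwise (· ≤ ·) := hspw.tail
    have hge : ∀ y ∈ t, v ≤ y := fun y hy => List.rel_of_pairwise_cons hspw hy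
    refine ⟨fun k => ?_, pvRleFrom_sorted t v 1 hpw hge, fun p hp => ?_⟩
    · rw [pvRleFrom_mem_fst]; simp
    · have := pvRleFrom_count t v 1 hpw hge p hp
      by_cases hpv : p.1 = v
      · rw [this]; simp [hpv]; omega
      · have hvp : ¬ v = p.1 := fun e => hpv e.symm
        rw [this]; simp [hpv, hvp]

-- ===== VERDICT (by name: the statement is the Claim_ definition above) =====
theorem chage_arr_spec : Claim_equal_chage_arr := by
  intro lst _
  show chage_arr lst = chage_arr_alt lst
  have hfl : ∀ k : Int, k ∈ lst.filter (fun x => decide (x ≠ 0)) ↔ (k ∈ lst ∧ k ≠ 0) := by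
    intro k; rw [List.mem_filter]; simp
  have hsp : (PySem.List.sorted (lst.filter (fun x => decide (x ≠ 0))) (fun x => x)).Perm
      (lst.filter (fun x => decide (x ≠ 0))) :=
    PySem.List.sorted_perm _ (fun x => x) false
  have hspw : (PySem.List.sorted (lst.filter (fun x => decide (x ≠ 0))) (fun x => x)).Pairwise (· ≤ ·) := by
    simpa using PySem.List.sorted_pairwise (lst.filter (fun x => decide (x ≠ 0))) (fun x => x)
  obtain ⟨hBfst, hBsorted, hBcount⟩ := pvB_props _ hspw
  have hmem_s : ∀ k : Int,
      k ∈ PySem.List.sorted (lst.filter (fun x => decide (x ≠ 0))) (fun x => x) ↔ (k ∈ lst ∧ k ≠ 0) := by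
    intro k; rw [hsp.mem_iff]; exact hfl k
  have hcount_lst : ∀ k : Int,
      k ∈ PySem.List.sorted (lst.filter (fun x => decide (x ≠ 0))) (fun x => x) →
      ((PySem.List.sorted (lst.filter (fun x => decide (x ≠ 0))) (fun x => x)).count k : Int) =
        (lst.count k : Int) := by
    intro k hk
    have hk0 : k ≠ 0 := ((hmem_s k).mp hk).2
    rw [hsp.count_eq, List.count_filter (by simp [hk0])]
  -- pairsB as a map over its (nodup) firsts, with the global count
  have hBmap : ((PySem.List.sorted (lst.filter (fun x => decide (x ≠ 0))) (fun x => x)).foldl pvStep []).reverse =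
      (((PySem.List.sorted (lst.filter (fun x => decide (x ≠ 0))) (fun x => x)).foldl
          pvStep []).reverse.map Prod.fst).map (fun k => (k, (lst.count k : Int))) := by
    rw [List.map_map]
    conv_lhs => rw [← List.map_id (((PySem.List.sorted (lst.filter (fun x => decide (x ≠ 0))) (fun x => x)).foldl pvStep []).reverse)]
    refine List.map_congr_left ?_
    intro p hp
    have h2 := hBcount p hp
    have hk : p.1 ∈ PySem.List.sorted (lst.filter (fun x => decide (x ≠ 0))) (fun x => x) :=
      (hBfst p.1).mp (List.mem_map.mpr ⟨p, hp, rfl⟩)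
    have h3 := hcount_lst p.1 hk
    simp only [Function.comp_apply, id]
    rw [← h3, ← h2]
  -- pairsA as a map over its (nodup) firsts
  have hAmap : ((PySem.Dict.counter lst).items.filter (fun p => decide (p.1 ≠ 0))) =
      ((PySem.Set.ofList lst).filter (fun k => decide (k ≠ 0))).map
        (fun k => (k, (lst.count k : Int))) := by
    rw [PySem.Dict.items_counter, List.filter_map]
    rfl
  -- the two key lists are permutations of each other
  have hKperm : ((((PySem.List.sorted (lst.filter (fun x => decide (x ≠ 0))) (fun x => x)).foldl
        pvStep []).reverse.map Prod.fst)).Perm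
      ((PySem.Set.ofList lst).filter (fun k => decide (k ≠ 0))) := by
    rw [List.perm_ext_iff_of_nodup
      (List.nodup_iff_pairwise_ne.mpr (hBsorted.imp ne_of_lt))
      (List.Nodup.filter _ (PySem.Set.nodup_ofList lst))]
    intro k
    rw [hBfst, hmem_s, List.mem_filter, PySem.Set.mem_ofList]
    simp
  have hperm : (((PySem.Dict.counter lst).items.filter (fun p => decide (p.1 ≠ 0)))).Perm
      (((PySem.List.sorted (lst.filter (fun x => decide (x ≠ 0))) (fun x => x)).foldl pvStep []).reverse) := by
    rw [hAmap, hBmap]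
    exact (hKperm.map _).symm
  -- the sorts agree: the lexicographic (count, value) key is injective
  have hinj : Function.Injective (fun p : Int × Int => toLex (p.2, p.1)) := by
    intro p q h
    have h' : (p.2, p.1) = (q.2, q.1) := congrArg ofLex h
    exact Prod.ext (congrArg Prod.snd h') (congrArg Prod.fst h')
  have hsortEq : PySem.List.sorted2
        ((PySem.Dict.counter lst).items.filter (fun p => decide (p.1 ≠ 0))) (fun x => x.2) (fun x => x.1) =
      PySem.List.sorted2
        (((PySem.List.sorted (lst.filter (fun x => decide (x ≠ 0))) (fun x => x)).foldl pvStep []).reverse)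
        (fun p => p.2) (fun p => p.1) := by
    rw [pvSorted2_eq_sorted_lex, pvSorted2_eq_sorted_lex]
    exact PySem.List.sorted_eq_sorted_of_perm _ _ _ hinj hperm
  -- the two flattening folds coincide
  have hfold : (fun (res : List Int) (i : Int × Int) =>
        [i.1, i.2].foldl (fun res j => res ++ [j]) res) =
      (fun (res : List Int) (p : Int × Int) => res ++ [p.1, p.2]) := by
    funext res i
    simp
  simp only [chage_arr, chage_arr_alt, hsortEq, hfold]
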